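-- pv_equiv track=rewrite | github.com/PVG-SKILLUP-CLUB/competitive-programming- | geeksforgeeks/Frequency Game/Solution.py | LargButMinFreq
-- ===== SOURCE A (Python) =====
-- def LargButMinFreq(arr,n):
--     d={}
--     m=100000000
--     ma=0
--     for i in arr:
--         if i not in d:
--             d[i]=1
--         else:
--             d[i]+=1
--     for i in d:
--         m=min(d[i],m)
--     for i in d:
--         if d[i]==m:
--             ma=max(ma,i)
--     return ma
-- ===== SOURCE B (Python) =====
-- def LargButMinFreq(arr, n):
--     # Sort-and-run-length grouping instead of a dict counter; the 10**8 seed of the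
--     # min reproduces A's sentinel (return 0 for empty input).
--     s = sorted(arr)
--     pairs = []
--     i = 0
--     L = len(s)
--     while i < L:
--         j = i + 1
--         while j < L and s[j] == s[i]:
--             j += 1
--         pairs.append((s[i], j - i))
--         i = j
--     m = 100000000
--     for _, c in pairs:
--         if c < m:
--             m = c
--     ma = 0
--     for v, c in pairs:
--         if c == m and v > ma:
--             ma = v
--     return ma
-- ===== Notes on version B (the rewrite author's own statement) =====
-- stated objective: alternative
-- what changed: Replaces the dict-counter plus two dict passes by sorting a copy of arr and scanning maximal runs of equal values to get each distinct value's count, then taking the minimum count and the largest value attaining it; the 10^8 seed of the running minimum is kept so the empty-input case returns 0.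
import Mathlib
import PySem

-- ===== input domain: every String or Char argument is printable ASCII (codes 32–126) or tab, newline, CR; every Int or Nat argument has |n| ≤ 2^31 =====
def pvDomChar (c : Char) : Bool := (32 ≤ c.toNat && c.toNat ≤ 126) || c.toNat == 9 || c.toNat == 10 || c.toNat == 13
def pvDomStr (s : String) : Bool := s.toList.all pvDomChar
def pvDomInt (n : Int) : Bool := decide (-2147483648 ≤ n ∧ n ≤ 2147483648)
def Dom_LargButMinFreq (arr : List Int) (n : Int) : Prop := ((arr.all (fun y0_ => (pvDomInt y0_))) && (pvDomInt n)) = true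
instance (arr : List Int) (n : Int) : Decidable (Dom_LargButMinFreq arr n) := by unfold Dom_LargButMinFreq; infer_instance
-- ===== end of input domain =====

-- B replaces A's dict counter by sorting a copy and run-length grouping (alternative algorithm, same result).

-- ===== PORT A =====
def LargButMinFreq (arr : List Int) (n : Int) : Int :=
  let d : PySem.Dict Int Int := arr.foldl (fun d i =>
    if !(d.contains i) then d.insert i 1 else d.insert i (d.getD i 0 + 1)) PySem.Dict.empty
  let m : Int := d.keys.foldl (fun m i => min (d.getD i 0) m) 100000000
  let ma : Int := d.keys.foldl (fun ma i => if d.getD i 0 = m then max ma i else ma) 0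
  ma

-- ===== PORT B =====
-- run-length grouping of a (sorted) list: the two nested while loops of Source B
def pvRuns (s : List Int) : List (Int × Int) :=
  match s with
  | [] => []
  | x :: xs =>
      (x, (1 + (xs.takeWhile (fun y => y == x)).length : Int)) ::
        pvRuns (xs.dropWhile (fun y => y == x))
termination_by s.length
decreasing_by
  simpa using Nat.lt_succ_of_le (List.length_dropWhile_le _ _)

def LargButMinFreq_alt (arr : List Int) (n : Int) : Int :=
  let s := PySem.List.sorted arr (fun x => x) false
  let pairs := pvRuns s
  let m : Int := pairs.foldl (fun m vc => if vc.2 < m then vc.2 else m) 100000000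
  let ma : Int := pairs.foldl (fun ma vc => if vc.2 = m ∧ ma < vc.1 then vc.1 else ma) 0
  ma

-- ===== PRECONDITION & SPEC =====
def Spec_LargButMinFreq (arr : List Int) (n : Int) (out : Int) : Prop := out = LargButMinFreq_alt arr n
instance (arr : List Int) (n : Int) (out : Int) : Decidable (Spec_LargButMinFreq arr n out) := by unfold Spec_LargButMinFreq; infer_instance

-- ===== CLAIM (what is proved, stated in full; the proofs are below) =====
def Claim_equal_LargButMinFreq : Prop := ∀ (arr : List Int) (n : Int), Dom_LargButMinFreq arr n → Spec_LargButMinFreq arr n (LargButMinFreq arr n)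

-- ===== LEMMAS AND PROOFS =====

-- A's counting loop builds exactly Counter(arr)
lemma dictA_eq (arr : List Int) :
    (arr.foldl (fun d i =>
      if !(d.contains i) then d.insert i 1 else d.insert i (d.getD i 0 + 1))
      (PySem.Dict.empty : PySem.Dict Int Int)) = PySem.Dict.counter arr := by
  have h : (fun (d : PySem.Dict Int Int) i =>
      if !(d.contains i) then d.insert i 1 else d.insert i (d.getD i 0 + 1))
      = (fun d i => d.insert i (d.getD i 0 + 1)) := by
    funext d i
    by_cases hc : d.contains i
    · simp [hc]
    · simp [hc,
        PySem.Dict.getD_of_not_contains (d := d) (k := i) (d0 := 0) (by simpa using hc)]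
  rw [h, PySem.Dict.foldl_insert_getD_add_one_eq_counter]

-- after a maximal run of x, everything in the rest of a sorted list is > x
lemma dropWhile_gt (x : Int) (xs : List Int) (hxle : ∀ y ∈ xs, x ≤ y)
    (hp : xs.Pairwise (· ≤ ·)) :
    ∀ z ∈ xs.dropWhile (fun y => y == x), x < z := by
  induction xs with
  | nil => simp
  | cons y ys ih =>
    by_cases hy : (y == x) = true
    · rw [List.dropWhile_cons, if_pos hy]
      exact ih (fun z hz => hxle z (by simp [hz])) hp.of_cons
    · rw [List.dropWhile_cons, if_neg hy]
      intro z hz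
      rcases List.mem_cons.mp hz with rfl | hz'
      · have h1 := hxle z (by simp)
        have h2 : z ≠ x := by simpa using hy
        omega
      · have h1 := (List.pairwise_cons.mp hp).1 z hz'
        have h2 := hxle y (by simp)
        have h3 : y ≠ x := by simpa using hy
        omega

-- on a sorted list, pvRuns yields exactly the pairs (v, count v), one per distinct value
lemma pvRuns_spec (s : List Int) (hs : s.Pairwise (· ≤ ·)) :
    (∀ p : Int × Int, p ∈ pvRuns s ↔ p.1 ∈ s ∧ p.2 = (s.count p.1 : Int)) ∧
      ((pvRuns s).map Prod.fst).Nodup := by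
  induction s using pvRuns.induct with
  | case1 => simp [pvRuns]
  | case2 x xs ih =>
    set t := xs.takeWhile (fun y => y == x) with hteq
    set r := xs.dropWhile (fun y => y == x) with hreq
    have htr : t ++ r = xs := List.takeWhile_append_dropWhile
    have hxsp : xs.Pairwise (· ≤ ·) := hs.of_cons
    have hxle : ∀ y ∈ xs, x ≤ y := fun y hy => (List.pairwise_cons.mp hs).1 y hy
    have ht : ∀ y ∈ t, y = x := by
      intro y hy
      have := List.mem_takeWhile_imp hy
      simpa using this.symm
    have hrsub : r.Sublist xs := List.dropWhile_sublist _
    have hrs : r.Pairwise (· ≤ ·) := hxsp.sublist hrsub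
    have hnr : ∀ z ∈ r, x < z := dropWhile_gt x xs hxle hxsp
    have hxnr : x ∉ r := fun h => lt_irrefl x (hnr x h)
    have hct : t.count x = t.length := List.count_eq_length.mpr (fun b hb => (ht b hb).symm)
    have hcx : (x :: xs).count x = 1 + t.length := by
      rw [← htr]
      simp [List.count_append, hct, List.count_eq_zero.mpr hxnr]
      omega
    have hcr : ∀ v ∈ r, (x :: xs).count v = r.count v := by
      intro v hv
      have hvx : v ≠ x := fun h => lt_irrefl x (h ▸ hnr v hv)
      have hvt : v ∉ t := fun h => hvx (ht v h)
      rw [← htr]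
      simp [List.count_append, List.count_cons, List.count_eq_zero.mpr hvt]
      exact fun h => absurd h.symm hvx
    obtain ⟨ihmem, ihnd⟩ := ih hrs
    constructor
    · intro p
      rw [pvRuns]
      simp only [List.mem_cons, ← hteq, ← hreq]
      constructor
      · rintro (rfl | hp)
        · exact ⟨by simp, by simp [hcx]⟩
        · obtain ⟨h1, h2⟩ := (ihmem p).mp hp
          refine ⟨by right; exact hrsub.mem h1, ?_⟩
          rw [h2, hcr p.1 h1]
      · rintro ⟨h1, h2⟩
        by_cases hpx : p.1 = x
        · left
          have hp2 : p.2 = (1 + t.length : Int) := by rw [h2, hpx, hcx]; push_cast; ring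
          obtain ⟨a, b⟩ := p
          simp only at hpx hp2
          rw [hpx, hp2]
        · right
          have hpxs : p.1 ∈ xs := by
            rcases h1 with h | h
            · exact absurd h hpx
            · exact h
          have hpr : p.1 ∈ r := by
            rw [← htr] at hpxs
            rcases List.mem_append.mp hpxs with h | h
            · exact absurd (ht _ h) hpx
            · exact h
          exact (ihmem p).mpr ⟨hpr, by rw [h2, hcr p.1 hpr]⟩
    · rw [pvRuns]
      simp only [List.map_cons, List.nodup_cons, ← hteq, ← hreq]
      refine ⟨?_, ihnd⟩
      intro hx
      obtain ⟨p, hp, hpx⟩ := List.mem_map.mp hx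
      have := ((ihmem p).mp hp).1
      exact absurd (hpx ▸ hnr p.1 this) (lt_irrefl x)

-- B's run list is a permutation of Counter(arr).items()
lemma pvRuns_perm (arr : List Int) :
    (pvRuns (PySem.List.sorted arr (fun x => x) false)).Perm
      ((PySem.Set.ofList arr).map (fun k => (k, (arr.count k : Int)))) := by
  set s := PySem.List.sorted arr (fun x => x) false with hseq
  have hperm : s.Perm arr := PySem.List.sorted_perm arr (fun x => x) false
  have hs : s.Pairwise (· ≤ ·) := by
    simpa using PySem.List.sorted_pairwise arr (fun x => x)
  obtain ⟨hmem, hnd⟩ := pvRuns_spec s hs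
  refine (List.perm_ext_iff_of_nodup (hnd.of_map) ?_).mpr ?_
  · exact (PySem.Set.nodup_ofList arr).map
      (fun a b h => by simpa using congrArg Prod.fst h)
  · intro p
    rw [hmem p]
    simp only [List.mem_map, PySem.Set.mem_ofList]
    constructor
    · rintro ⟨h1, h2⟩
      refine ⟨p.1, hperm.mem_iff.mp h1, ?_⟩
      have : s.count p.1 = arr.count p.1 := hperm.count_eq p.1
      obtain ⟨a, b⟩ := p
      simp only at h2 this ⊢
      rw [h2, this]
    · rintro ⟨k, hk, rfl⟩
      exact ⟨hperm.mem_iff.mpr hk, by simp [hperm.count_eq k]⟩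

-- ===== VERDICT (by name: the statement is the Claim_ definition above) =====
theorem LargButMinFreq_spec : Claim_equal_LargButMinFreq := by
  intro arr n _
  unfold Spec_LargButMinFreq
  have hA : LargButMinFreq arr n =
      (fun m => (PySem.Set.ofList arr).foldl
          (fun ma k => if (arr.count k : Int) = m then max ma k else ma) 0)
        ((PySem.Set.ofList arr).foldl (fun m k => min ((arr.count k : Int)) m) 100000000) := by
    unfold LargButMinFreq
    rw [dictA_eq]
    simp only [PySem.Dict.keys_counter, PySem.Dict.getD_counter]
  have hperm := pvRuns_perm arr
  have hmin : (pvRuns (PySem.List.sorted arr (fun x => x) false)).foldl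
      (fun m vc => if vc.2 < m then vc.2 else m) 100000000
      = (PySem.Set.ofList arr).foldl (fun m k => min ((arr.count k : Int)) m) 100000000 := by
    have h1 : (fun (m : Int) (vc : Int × Int) => if vc.2 < m then vc.2 else m)
        = (fun m vc => min vc.2 m) := by
      funext m vc; split_ifs <;> omega
    rw [h1, List.Perm.foldl_eq (rcomm := ⟨fun m a b => by omega⟩) hperm, List.foldl_map]
  set m : Int := (PySem.Set.ofList arr).foldl (fun m k => min ((arr.count k : Int)) m) 100000000
    with hm
  have hmax : (pvRuns (PySem.List.sorted arr (fun x => x) false)).foldl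
      (fun ma vc => if vc.2 = m ∧ ma < vc.1 then vc.1 else ma) 0
      = (PySem.Set.ofList arr).foldl
          (fun ma k => if (arr.count k : Int) = m then max ma k else ma) 0 := by
    have h1 : (fun (ma : Int) (vc : Int × Int) => if vc.2 = m ∧ ma < vc.1 then vc.1 else ma)
        = (fun ma vc => if vc.2 = m then max ma vc.1 else ma) := by
      funext ma vc; split_ifs <;> omega
    rw [h1, List.Perm.foldl_eq (rcomm := ⟨fun ma a b => by split_ifs <;> omega⟩) hperm, List.foldl_map]
  rw [hA]
  unfold LargButMinFreq_alt
  simp only [hmin, hmax]
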